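-- pv_equiv track=rewrite | github.com/shi0524/algorithmbasic2020 | Python2/class13/Code05_LowestLexicography.py | process
-- ===== SOURCE A (Python) =====
-- def process(strs):
--     if not strs:
--         return [""]
--     all_strs = []
--     for i in range(len(strs)):
--         first = strs[i]
--         nexts = strs[::]
--         nexts.pop(i)
--         next_strs = process(nexts)
--         for cur in next_strs:
--             all_strs.append(first + cur)
--     return all_strs
-- ===== SOURCE B (Python) =====
-- from itertools import permutations
--
-- def process(strs):
--     return [''.join(p) for p in permutations(strs)]
-- ===== Notes on version B (the rewrite author's own statement) =====
-- stated objective: idiomatic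
-- what changed: Replaces the hand-written recursion (copy list, pop index, recurse, concatenate) by a single comprehension over itertools.permutations, whose positional emission order matches A's fix-index-then-recurse order.
import Mathlib
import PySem

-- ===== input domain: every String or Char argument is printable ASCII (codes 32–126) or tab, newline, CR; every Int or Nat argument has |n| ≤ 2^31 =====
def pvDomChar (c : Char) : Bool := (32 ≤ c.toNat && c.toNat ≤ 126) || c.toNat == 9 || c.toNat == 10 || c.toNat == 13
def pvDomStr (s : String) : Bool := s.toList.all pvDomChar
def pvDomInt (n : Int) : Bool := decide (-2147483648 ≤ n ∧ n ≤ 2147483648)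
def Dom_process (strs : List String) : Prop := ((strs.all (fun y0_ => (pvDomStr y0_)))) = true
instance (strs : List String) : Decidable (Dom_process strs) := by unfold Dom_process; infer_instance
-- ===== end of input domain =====

-- B replaces A's hand-written recursion by itertools.permutations (idiomatic; same order).

-- ===== PORT A =====
-- A: for i in range(len(strs)): recurse on strs with index i popped, prefix strs[i].
def process (strs : List String) : List String :=
  if strs.isEmpty then [""]
  else (List.finRange strs.length).flatMap
    (fun (i : Fin strs.length) =>
      (process (strs.eraseIdx i.1)).map (fun cur => strs.get i ++ cur))
termination_by strs.length
decreasing_by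
  have hi := i.isLt
  simp [List.length_eraseIdx, hi]
  omega

-- ===== PORT B =====
-- selections/perms mirror itertools.permutations: tuples emitted in positional order.
def selections {α : Type} : List α → List (α × List α)
  | [] => []
  | x :: xs => (x, xs) :: (selections xs).map (fun p => (p.1, x :: p.2))

theorem selections_mem_length {α : Type} : ∀ (xs : List α) (p : α × List α),
    p ∈ selections xs → p.2.length + 1 = xs.length := by
  intro xs
  induction xs with
  | nil => intro p hp; simp [selections] at hp
  | cons x xs ih =>
    intro p hp
    simp [selections] at hp
    rcases hp with rfl | ⟨a, b, hab, rfl⟩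
    · simp
    · have := ih (a, b) hab; simp at this ⊢; omega

def perms : List String → List (List String)
  | [] => [[]]
  | x :: xs =>
    (selections (x :: xs)).attach.flatMap (fun p => (perms p.1.2).map (p.1.1 :: ·))
termination_by l => l.length
decreasing_by
  have := selections_mem_length (x :: xs) p.1 p.2
  simp at this ⊢
  omega

-- port of ''.join
def joinAll : List String → String
  | [] => ""
  | s :: r => s ++ joinAll r

def process_alt (strs : List String) : List String := (perms strs).map joinAll

-- ===== PRECONDITION & SPEC =====
def Spec_process (strs : List String) (out : List String) : Prop := out = process_alt strs
instance (strs : List String) (out : List String) : Decidable (Spec_process strs out) := by unfold Spec_process; infer_instance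

-- ===== CLAIM (what is proved, stated in full; the proofs are below) =====
def Claim_equal_process : Prop := ∀ (strs : List String), Dom_process strs → Spec_process strs (process strs)

-- ===== LEMMAS AND PROOFS =====

theorem selections_eq {α : Type} : ∀ (xs : List α),
    selections xs = (List.finRange xs.length).map (fun i => (xs.get i, xs.eraseIdx i)) := by
  intro xs
  induction xs with
  | nil => simp [selections]
  | cons x xs ih =>
    simp [selections, ih, List.finRange_succ, List.map_map, Function.comp]

theorem flatMap_attach' {α β : Type} (l : List α) (g : α → List β) :
    l.attach.flatMap (fun p => g p.1) = l.flatMap g := by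
  simp

theorem perms_cons (x : String) (xs : List String) :
    perms (x :: xs) = (selections (x :: xs)).flatMap (fun p => (perms p.2).map (p.1 :: ·)) := by
  rw [perms]
  exact flatMap_attach' (selections (x :: xs)) (fun q => (perms q.2).map (q.1 :: ·))

theorem process_eq_alt : ∀ (strs : List String), process strs = process_alt strs := by
  intro strs
  induction hn : strs.length using Nat.strong_induction_on generalizing strs with
  | _ n ih =>
    cases strs with
    | nil => simp [process, process_alt, perms, joinAll]
    | cons x xs =>
      rw [process]
      simp only [List.isEmpty_cons, if_false, Bool.false_eq_true]
      rw [process_alt, perms_cons, selections_eq, List.flatMap_map, List.map_flatMap]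
      apply List.flatMap_congr
      intro i _
      have hlen : ((x :: xs).eraseIdx i.1).length < n := by
        have hi := i.isLt
        rw [List.length_eraseIdx_of_lt hi]; omega
      rw [ih _ hlen _ rfl, process_alt, List.map_map, List.map_map]
      rfl


-- ===== VERDICT (by name: the statement is the Claim_ definition above) =====
theorem process_spec : Claim_equal_process := by
  intro strs _
  exact process_eq_alt strs
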